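-- pv_equiv track=rewrite | github.com/zshafiqu/vehicleinfo.org | micro_services/scraping_lib/style_utilities.py | mappify_headings_and_attributes_from_list
-- ===== SOURCE A (Python) =====
-- def mappify_headings_and_attributes_from_list(headings, attributes):
--     # We have a list of headings (the trims)
--     # and list of attributes (all attributes for all trims, we need to slice this properly)
--     '''
--     An example of headings:
--         ['Dealer Home Service', 'Base Style', 'TTS', 'RS']
--         len() = 4
--
--     An example of attributes:
--         ['Combined Fuel Economy', '26 MPG', 'Seating', 'Seats 4', 'Horsepower', '228 @ 4500 RPM HP', 'Engine', '4-Cyl, Turbo, 2.0 Liter', 'Combined Fuel Economy', '25 MPG', 'Seating', 'Seats 4', 'Horsepower', '288 @ 5400 RPM HP', 'Engine', '4-Cyl, Turbo, 2.0 Liter', 'Combined Fuel Economy', '23 MPG', 'Seating', 'Seats 4', 'Horsepower', '394 hp HP', 'Engine', '5-Cyl, Turbo, 2.5 Liter']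
--         len() = 24
--
--     See pseudocode below;
--         for heading in headings:
--             for attribute in attributes:
--                 go until you've finished this trim's attributes
--
--         dictionary : {
--             trim : { attributes },
--             trim : { attributes },
--             etc.
--         }
--     '''
--
--     # Use 'i' to traverse the list of headings, remember KBB added this 'Dealer Home Service' box, so be sure to skip that
--     i = 1 # 'Dealer Home Service' will always be first, so just set that to 1 so we skip it
--     j = 0 # Use 'j' as a loop control variable for the attributes list
--     outer_map = dict() # This will be the wrapping dictionary for our JSON object
--
--     # For each trim
--     while i < len(headings):
--
--         topmost_attribute = attributes[0] # We need to know when we've finished a trim, so we use the topmost attribute as an indicator of when we've completed one trim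
--         inner_map = dict() # Each trim gets its own dictionary with its attributes
--         new_trim_flag = True
--
--         # Go through the list of attributes until the second to last value
--         while j < len(attributes)-1:
--             # Check if the current attribute is the topmost attribute, because that would indicate we just finished a trim and are on the next set of attributes
--             if attributes[j] == topmost_attribute and new_trim_flag == False:
--                 # Set thew new_trim_flag to True indicating that we're ready to work on a new trim
--                 new_trim_flag = True
--                 break
--             else:
--                 # Set the new_trim_flag to false cause we're currently workign on a trim
--                 new_trim_flag = False
--                 # Key, value mapping ... 'Combined Fuel Economy' : '26 MPG'
--                 inner_map[attributes[j]] = attributes[j+1]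
--                  # Jump by two because we've mapped the last two values as key,value
--                 j += 2
--
--         # Once the attributes have been assigned as we've broke out of the inner loop, map the trim to it's dictionary of attributes
--         outer_map[headings[i]] = inner_map
--         # Go to the next heading (trim)
--         i += 1
--
--     # By now, all attributes and trims should be parsed as the dictionary 'trims'
--     return outer_map
-- ===== SOURCE B (Python) =====
-- def mappify_headings_and_attributes_from_list(headings, attributes):
--     # Different decomposition: chunk the attribute list into (key, value)
--     # pairs first, split the pair list into trim segments at pairs whose key
--     # repeats attributes[0], then pad/truncate the segments against headings[1:].
--     if len(headings) <= 1:
--         return {}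
--     delimiter = attributes[0]  # IndexError on empty attributes, as in A
--     pairs = [(attributes[k], attributes[k + 1])
--              for k in range(0, len(attributes) - 1, 2)]
--     groups = []
--     current = []
--     for kv in pairs:
--         if current and kv[0] == delimiter:
--             groups.append(current)
--             current = [kv]
--         else:
--             current.append(kv)
--     if current:
--         groups.append(current)
--     maps = [dict(g) for g in groups]
--     out = {}
--     for idx, trim in enumerate(headings[1:]):
--         out[trim] = maps[idx] if idx < len(maps) else {}
--     return out
-- ===== Notes on version B (the rewrite author's own statement) =====
-- stated objective: alternative
-- what changed: A's fused index scan (two nested while loops sharing a running index j and a new-trim flag) is replaced by a pipeline: chunk attributes into (key,value) pairs, split the pair list into segments at pairs whose key repeats attributes[0], build a dict per segment, then pad/truncate the segments against headings[1:].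
import Mathlib
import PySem

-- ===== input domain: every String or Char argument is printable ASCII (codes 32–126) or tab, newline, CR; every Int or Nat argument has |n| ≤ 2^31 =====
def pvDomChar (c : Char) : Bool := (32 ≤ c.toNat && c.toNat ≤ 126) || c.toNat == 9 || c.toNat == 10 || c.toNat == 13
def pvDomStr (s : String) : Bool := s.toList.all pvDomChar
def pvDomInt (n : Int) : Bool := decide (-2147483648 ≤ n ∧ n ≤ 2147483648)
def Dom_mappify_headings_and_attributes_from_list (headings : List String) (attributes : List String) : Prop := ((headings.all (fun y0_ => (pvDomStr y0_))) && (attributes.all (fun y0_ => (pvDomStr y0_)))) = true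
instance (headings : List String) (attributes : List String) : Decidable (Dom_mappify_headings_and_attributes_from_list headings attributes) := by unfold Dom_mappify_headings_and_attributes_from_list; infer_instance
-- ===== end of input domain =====

-- B chunks the attributes into (key,value) pairs, splits the pair list into segments at
-- repeats of attributes[0], and zips segments with headings[1:] — same result as A's fused
-- index scan with a flag (objective: alternative decomposition, similar cost).


-- ===== PORT A =====
-- inner while loop: state = (j, new_trim_flag, inner_map); breaks at a repeat of the topmost attribute
def pvA_inner (attrs : List String) (top : String) (j : Nat) (flag : Bool)
    (m : PySem.Dict String String) : Nat × PySem.Dict String String :=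
  if _h : j < attrs.length - 1 then
    if attrs.getD j "" == top && flag == false then (j, m)
    else pvA_inner attrs top (j + 2) false (m.insert (attrs.getD j "") (attrs.getD (j + 1) ""))
  else (j, m)
termination_by attrs.length - 1 - j
decreasing_by omega

-- outer while loop: i over headings (starting at 1), j threaded through the inner loop
def pvA_outer (headings attrs : List String) (i j : Nat)
    (acc : PySem.Dict String (PySem.Dict String String)) :
    PySem.Dict String (PySem.Dict String String) :=
  if _h : i < headings.length then
    let top := attrs.getD 0 ""   -- attributes[0]; Pre_ excludes the IndexError case
    let r := pvA_inner attrs top j true PySem.Dict.empty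
    pvA_outer headings attrs (i + 1) r.1 (acc.insert (headings.getD i "") r.2)
  else acc
termination_by headings.length - i
decreasing_by omega

def mappify_headings_and_attributes_from_list (headings : List String) (attributes : List String) :
    List (String × List (String × String)) :=
  (pvA_outer headings attributes 1 0 PySem.Dict.empty).items.map (fun p => (p.1, p.2.items))

-- ===== PORT B =====
-- pairs = [(attributes[k], attributes[k+1]) for k in range(0, len(attributes)-1, 2)]
def pvB_pairs (attrs : List String) : List (String × String) :=
  (PySem.List.pyRange 0 ((attrs.length : Int) - 1) 2).map
    (fun k => (PySem.List.pyGetD attrs k "", PySem.List.pyGetD attrs (k + 1) ""))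

-- one step of the grouping loop; state = (groups, current)
def pvB_group (delim : String)
    (st : List (List (String × String)) × List (String × String)) (kv : String × String) :
    List (List (String × String)) × List (String × String) :=
  if !st.2.isEmpty && kv.1 == delim then (st.1 ++ [st.2], [kv]) else (st.1, st.2 ++ [kv])

def pvB_groups (delim : String) (pairs : List (String × String)) :
    List (List (String × String)) :=
  let st := pairs.foldl (pvB_group delim) ([], [])
  if st.2.isEmpty then st.1 else st.1 ++ [st.2]

def mappify_headings_and_attributes_from_list_alt (headings : List String) (attributes : List String) :
    List (String × List (String × String)) :=
  if headings.length ≤ 1 then []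
  else
    let delim := attributes.getD 0 ""   -- attributes[0]; Pre_ excludes the IndexError case
    let maps := (pvB_groups delim (pvB_pairs attributes)).map PySem.Dict.ofList
    let out := (PySem.List.enumerate (PySem.List.slice headings (some 1) none) 0).foldl
      (fun d p => d.insert p.2
        (if p.1 < PySem.List.len maps then PySem.List.pyGetD maps p.1 PySem.Dict.empty
         else PySem.Dict.empty)) PySem.Dict.empty
    out.items.map (fun p => (p.1, p.2.items))

-- ===== PRECONDITION & SPEC =====
-- Pre_ excludes exactly the inputs where A raises IndexError on attributes[0]
-- (more than one heading together with an empty attribute list); B raises there too.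
def Pre_mappify_headings_and_attributes_from_list (headings : List String) (attributes : List String) : Prop :=
  headings.length ≤ 1 ∨ attributes ≠ []
instance (headings : List String) (attributes : List String) : Decidable (Pre_mappify_headings_and_attributes_from_list headings attributes) := by unfold Pre_mappify_headings_and_attributes_from_list; infer_instance

def pvWitness_mappify_headings_and_attributes_from_list : List String × List String :=
  (["Dealer Home Service", "Base", "Sport"],
   ["Fuel", "26 MPG", "Seats", "4", "Fuel", "25 MPG", "Seats", "5"])

def Spec_mappify_headings_and_attributes_from_list (headings : List String) (attributes : List String) (out : List (String × List (String × String))) : Prop := out = mappify_headings_and_attributes_from_list_alt headings attributes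
instance (headings : List String) (attributes : List String) (out : List (String × List (String × String))) : Decidable (Spec_mappify_headings_and_attributes_from_list headings attributes out) := by unfold Spec_mappify_headings_and_attributes_from_list; infer_instance

-- ===== CLAIM (what is proved, stated in full; the proofs are below) =====
def Claim_equal_mappify_headings_and_attributes_from_list : Prop := ∀ (headings : List String) (attributes : List String), Dom_mappify_headings_and_attributes_from_list headings attributes → Pre_mappify_headings_and_attributes_from_list headings attributes → Spec_mappify_headings_and_attributes_from_list headings attributes (mappify_headings_and_attributes_from_list headings attributes)

-- ===== LEMMAS AND PROOFS =====

-- the (key, value) pair chunking of the attribute list (dangling element dropped)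
def pairList : List String → List (String × String)
  | [] => []
  | [_] => []
  | x :: y :: r => (x, y) :: pairList r

-- A's inner loop restated on the pair list
def innerP (top : String) : List (String × String) → Bool → PySem.Dict String String →
    List (String × String) × PySem.Dict String String
  | [], _, m => ([], m)
  | kv :: rest, flag, m =>
    if kv.1 == top && flag == false then (kv :: rest, m)
    else innerP top rest false (m.insert kv.1 kv.2)

theorem pairList_short {xs : List String} (h : xs.length ≤ 1) : pairList xs = [] := by
  match xs, h with
  | [], _ => rfl
  | [_], _ => rfl

theorem drop_two {attrs : List String} {j : Nat} (h : j < attrs.length - 1) :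
    attrs.drop j = attrs[j]'(by omega) :: attrs[j+1]'(by omega) :: attrs.drop (j + 2) := by
  rw [List.drop_eq_getElem_cons (by omega), List.drop_eq_getElem_cons (by omega : j + 1 < attrs.length)]

theorem pairList_drop {attrs : List String} {j : Nat} (h : j < attrs.length - 1) :
    pairList (attrs.drop j) = (attrs[j]'(by omega), attrs[j+1]'(by omega)) :: pairList (attrs.drop (j + 2)) := by
  rw [drop_two h]; rfl

theorem pvA_inner_eq (attrs : List String) (top : String) (j : Nat) (flag : Bool)
    (m : PySem.Dict String String) :
    (pvA_inner attrs top j flag m).2 = (innerP top (pairList (attrs.drop j)) flag m).2 ∧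
    pairList (attrs.drop (pvA_inner attrs top j flag m).1) =
      (innerP top (pairList (attrs.drop j)) flag m).1 := by
  induction j, flag, m using pvA_inner.induct attrs top with
  | case1 j flag m h hc =>
    rw [pvA_inner, dif_pos h, if_pos hc, pairList_drop h, innerP]
    rw [List.getD_eq_getElem _ _ (by omega : j < attrs.length)] at hc
    have hp : attrs[j]'(by omega) = top ∧ flag = false := by simpa using hc
    simp [hp.1, hp.2]
  | case2 j flag m h hc ih =>
    have e1 : attrs.getD j "" = attrs[j]'(by omega) := List.getD_eq_getElem _ _ (by omega)
    have e2 : attrs.getD (j+1) "" = attrs[j+1]'(by omega) := List.getD_eq_getElem _ _ (by omega)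
    rw [pvA_inner, dif_pos h, pairList_drop h, innerP, e1, e2]
    rw [e1] at hc
    have hp : ¬(attrs[j]'(by omega) = top ∧ flag = false) := by simpa using hc
    simp only [e1, e2] at ih
    simpa [hp] using ih
  | case3 j flag m h =>
    rw [pvA_inner, dif_neg h]
    have e : pairList (attrs.drop j) = [] := pairList_short (by simp; omega)
    rw [e, innerP]
    exact ⟨rfl, rfl⟩

-- A's outer loop restated on headings-suffix × pair-list
def outerP (top : String) : List String → List (String × String) →
    PySem.Dict String (PySem.Dict String String) → PySem.Dict String (PySem.Dict String String)
  | [], _, acc => acc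
  | h :: hs, ps, acc =>
    let r := innerP top ps true PySem.Dict.empty
    outerP top hs r.1 (acc.insert h r.2)

theorem pvA_outer_eq (headings attrs : List String) (i j : Nat)
    (acc : PySem.Dict String (PySem.Dict String String)) :
    pvA_outer headings attrs i j acc =
      outerP (attrs.getD 0 "") (headings.drop i) (pairList (attrs.drop j)) acc := by
  induction i, j, acc using pvA_outer.induct headings attrs with
  | case1 i j acc h _top _r ih =>
    rw [pvA_outer, dif_pos h]
    rw [List.drop_eq_getElem_cons h, outerP]
    have hin := pvA_inner_eq attrs (attrs.getD 0 "") j true PySem.Dict.empty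
    rw [ih, hin.1, hin.2, List.getD_eq_getElem _ _ h]
  | case2 i j acc h =>
    rw [pvA_outer, dif_neg h, List.drop_eq_nil_of_le (by omega), outerP]

theorem range_pairs (xs : List String) :
    (List.range (xs.length / 2)).map (fun k => (xs.getD (2 * k) "", xs.getD (2 * k + 1) "")) =
      pairList xs := by
  induction xs using pairList.induct with
  | case1 => rfl
  | case2 _ => simp [pairList]
  | case3 x y r ih =>
    have hl : (x :: y :: r).length / 2 = r.length / 2 + 1 := by simp; omega
    rw [hl, List.range_succ_eq_map, List.map_cons, List.map_map, pairList]
    refine congrArg₂ _ rfl ?_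
    rw [← ih]
    refine List.map_congr_left ?_
    intro k _
    have e1 : 2 * (k + 1) = 2 * k + 1 + 1 := by ring
    simp only [Function.comp_apply, e1, List.getD_cons_succ]

theorem pvB_pairs_eq (attrs : List String) : pvB_pairs attrs = pairList attrs := by
  unfold pvB_pairs
  rw [PySem.List.pyRange_of_pos 0 ((attrs.length : Int) - 1) (by norm_num)]
  have hcnt : (if (0:Int) < (attrs.length : Int) - 1 then
      (((attrs.length : Int) - 1 - 0 + 2 - 1) / 2).toNat else 0) = attrs.length / 2 := by
    split <;> omega
  rw [hcnt, List.map_map, ← range_pairs attrs]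
  refine List.map_congr_left ?_
  intro k _
  have h1 : (0 : Int) + 2 * (k : Int) = ((2 * k : Nat) : Int) := by push_cast; ring
  have h2 : ((2 * k : Nat) : Int) + 1 = ((2 * k + 1 : Nat) : Int) := by push_cast; ring
  simp only [Function.comp_apply, h1, h2, PySem.List.pyGetD_natCast]

-- greedy scan with flag=false: pairs until (and excluding) the next delimiter pair
def takeGrp (d : String) : List (String × String) →
    List (String × String) × List (String × String)
  | [] => ([], [])
  | kv :: rest =>
    if kv.1 == d then ([], kv :: rest)
    else
      let r := takeGrp d rest
      (kv :: r.1, r.2)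

theorem takeGrp_snd_length (d : String) (l : List (String × String)) :
    (takeGrp d l).2.length ≤ l.length := by
  induction l with
  | nil => simp [takeGrp]
  | cons kv rest ih =>
    simp only [takeGrp]
    split
    · simp
    · simpa using Nat.le_succ_of_le ih

-- the segment decomposition of the pair list
def splitG (d : String) : List (String × String) → List (List (String × String))
  | [] => []
  | kv :: rest =>
    (kv :: (takeGrp d rest).1) :: splitG d (takeGrp d rest).2
termination_by l => l.length
decreasing_by exact Nat.lt_succ_of_le (takeGrp_snd_length d rest)

theorem innerP_false (top : String) (l : List (String × String)) (m : PySem.Dict String String) :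
    innerP top l false m = ((takeGrp top l).2, m.update (takeGrp top l).1) := by
  induction l generalizing m with
  | nil => rfl
  | cons kv rest ih =>
    rw [innerP, takeGrp]
    by_cases hk : kv.1 == top
    · simp [hk, PySem.Dict.update]
    · simp only [hk, Bool.false_and, Bool.false_eq_true, ite_false]
      rw [ih]
      rfl

theorem innerP_true (top : String) (kv : String × String) (rest : List (String × String))
    (m : PySem.Dict String String) :
    innerP top (kv :: rest) true m =
      ((takeGrp top rest).2, m.update (kv :: (takeGrp top rest).1)) := by
  rw [innerP]
  simp only [Bool.and_eq_true, beq_iff_eq, Bool.true_eq_false, and_false, if_false]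
  rw [innerP_false]
  rfl

def pvFinish (st : List (List (String × String)) × List (String × String)) :
    List (List (String × String)) :=
  if st.2.isEmpty then st.1 else st.1 ++ [st.2]

theorem foldl_group_eq (d : String) (rest : List (String × String)) :
    ∀ (gs : List (List (String × String))) (cur : List (String × String)), cur ≠ [] →
    pvFinish (rest.foldl (pvB_group d) (gs, cur)) =
      gs ++ (cur ++ (takeGrp d rest).1) :: splitG d (takeGrp d rest).2 := by
  induction rest with
  | nil =>
    intro gs cur hc
    simp [pvFinish, takeGrp, splitG, List.isEmpty_iff, hc]
  | cons kv rest ih =>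
    intro gs cur hc
    rw [List.foldl_cons]
    by_cases hk : kv.1 == d
    · have hstep : pvB_group d (gs, cur) kv = (gs ++ [cur], [kv]) := by
        simp [pvB_group, hk, hc]
      rw [hstep, ih _ _ (by simp), takeGrp]
      simp only [hk, if_true]
      rw [splitG]
      simp
    · have hstep : pvB_group d (gs, cur) kv = (gs, cur ++ [kv]) := by
        simp [pvB_group, hk]
      rw [hstep, ih _ _ (by simp), takeGrp]
      simp only [hk, Bool.false_eq_true, if_false]
      simp

theorem pvB_groups_eq (d : String) (ps : List (String × String)) :
    pvB_groups d ps = splitG d ps := by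
  cases ps with
  | nil => rw [splitG]; rfl
  | cons kv rest =>
    show pvFinish (List.foldl (pvB_group d) ([], []) (kv :: rest)) = _
    rw [List.foldl_cons]
    have hstep : pvB_group d ([], []) kv = ([], [kv]) := by simp [pvB_group]
    rw [hstep, foldl_group_eq d rest [] [kv] (by simp), splitG]
    simp

-- B's padded zip restated structurally
def bFold : List String → List (PySem.Dict String String) →
    PySem.Dict String (PySem.Dict String String) → PySem.Dict String (PySem.Dict String String)
  | [], _, acc => acc
  | h :: hs, [], acc => bFold hs [] (acc.insert h PySem.Dict.empty)
  | h :: hs, m :: ms, acc => bFold hs ms (acc.insert h m)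

theorem outerP_eq_bFold (top : String) (hs : List String) :
    ∀ (ps : List (String × String)) (acc : PySem.Dict String (PySem.Dict String String)),
    outerP top hs ps acc = bFold hs ((splitG top ps).map PySem.Dict.ofList) acc := by
  induction hs with
  | nil => intro ps acc; rw [splitG.eq_def]; cases ps <;> rfl
  | cons h hs ih =>
    intro ps acc
    cases ps with
    | nil =>
      rw [outerP, splitG, List.map_nil, bFold]
      have h2 := ih [] (acc.insert h PySem.Dict.empty)
      rw [splitG, List.map_nil] at h2
      exact h2
    | cons kv rest =>
      rw [outerP, splitG, List.map_cons, bFold, innerP_true]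
      exact ih _ _

theorem enum_foldl_eq_bFold (maps : List (PySem.Dict String String)) (hs : List String) :
    ∀ (k : Nat) (acc : PySem.Dict String (PySem.Dict String String)),
    (PySem.List.enumerate hs (k : Int)).foldl
      (fun d p => d.insert p.2
        (if p.1 < PySem.List.len maps then PySem.List.pyGetD maps p.1 PySem.Dict.empty
         else PySem.Dict.empty)) acc = bFold hs (maps.drop k) acc := by
  induction hs with
  | nil => intro k acc; rw [PySem.List.enumerate_nil]; cases maps.drop k <;> rfl
  | cons h hs ih =>
    intro k acc
    rw [PySem.List.enumerate_cons, List.foldl_cons]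
    have hk1 : ((k : Int) + 1) = ((k + 1 : Nat) : Int) := by push_cast; ring
    by_cases hlt : k < maps.length
    · have hdrop : maps.drop k = maps[k] :: maps.drop (k + 1) := List.drop_eq_getElem_cons hlt
      have hv : (if ((k : Int)) < PySem.List.len maps then PySem.List.pyGetD maps (k : Int) PySem.Dict.empty
          else PySem.Dict.empty) = maps[k] := by
        rw [if_pos (by rw [PySem.List.len_eq]; exact_mod_cast hlt), PySem.List.pyGetD_natCast]
        exact List.getD_eq_getElem _ _ hlt
      rw [hdrop, bFold, hv, hk1, ih]
    · have hv : (if ((k : Int)) < PySem.List.len maps then PySem.List.pyGetD maps (k : Int) PySem.Dict.empty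
          else PySem.Dict.empty) = PySem.Dict.empty := by
        rw [if_neg (by rw [PySem.List.len_eq]; exact_mod_cast hlt)]
      rw [List.drop_eq_nil_of_le (by omega), bFold, hv, hk1, ih,
        List.drop_eq_nil_of_le (by omega)]

theorem main_eq (headings attributes : List String) :
    mappify_headings_and_attributes_from_list headings attributes =
      mappify_headings_and_attributes_from_list_alt headings attributes := by
  by_cases hl : headings.length ≤ 1
  · unfold mappify_headings_and_attributes_from_list mappify_headings_and_attributes_from_list_alt
    rw [if_pos hl, pvA_outer, dif_neg (by omega)]
    rfl
  · unfold mappify_headings_and_attributes_from_list mappify_headings_and_attributes_from_list_alt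
    rw [if_neg hl]
    dsimp only
    rw [pvA_outer_eq, List.drop_zero, PySem.List.slice_from_one, pvB_pairs_eq, pvB_groups_eq]
    rw [show (0:Int) = ((0:Nat):Int) from rfl, enum_foldl_eq_bFold, List.drop_zero]
    rw [outerP_eq_bFold, List.drop_one]

-- ===== VERDICT (by name: the statement is the Claim_ definition above) =====
theorem mappify_headings_and_attributes_from_list_spec : Claim_equal_mappify_headings_and_attributes_from_list := by
  intro headings attributes _ _hpre
  unfold Spec_mappify_headings_and_attributes_from_list
  exact main_eq headings attributes
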